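-- pv_equiv track=rewrite | github.com/movarnell/MeetingManager | generate_xcodeproj.py | files_in_group
-- ===== SOURCE A (Python) =====
-- SWIFT_FILES = [
--     "MeetingManager/MeetingManagerApp.swift",
--     "MeetingManager/Extensions/AVAudioPCMBuffer+Extensions.swift",
--     "MeetingManager/Extensions/CMSampleBuffer+Extensions.swift",
--     "MeetingManager/Extensions/Data+WAVHeader.swift",
--     "MeetingManager/Models/AudioSource.swift",
--     "MeetingManager/Models/Meeting.swift",
--     "MeetingManager/Models/MeetingNotes.swift",
--     "MeetingManager/Models/OllamaTypes.swift",
--     "MeetingManager/Models/RecordingState.swift",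
--     "MeetingManager/Models/Transcript.swift",
--     "MeetingManager/Services/AudioMixerService.swift",
--     "MeetingManager/Services/AudioRecordingService.swift",
--     "MeetingManager/Services/MicrophoneCaptureService.swift",
--     "MeetingManager/Services/OllamaService.swift",
--     "MeetingManager/Services/StorageService.swift",
--     "MeetingManager/Services/SystemAudioCaptureService.swift",
--     "MeetingManager/Services/TranscriptionService.swift",
--     "MeetingManager/Utilities/AudioFormatConverter.swift",
--     "MeetingManager/Utilities/Constants.swift",
--     "MeetingManager/Utilities/DateFormatters.swift",
--     "MeetingManager/Utilities/WAVFileWriter.swift",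
--     "MeetingManager/ViewModels/MeetingNotesViewModel.swift",
--     "MeetingManager/ViewModels/MeetingsListViewModel.swift",
--     "MeetingManager/ViewModels/RecordingViewModel.swift",
--     "MeetingManager/ViewModels/SettingsViewModel.swift",
--     "MeetingManager/ViewModels/TranscriptionViewModel.swift",
--     "MeetingManager/Views/Components/EmptyStateView.swift",
--     "MeetingManager/Views/Components/StatusIndicatorView.swift",
--     "MeetingManager/Views/Components/TagEditorView.swift",
--     "MeetingManager/Views/Components/WaveformView.swift",
--     "MeetingManager/Views/ContentView.swift",
--     "MeetingManager/Views/MeetingDetailView.swift",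
--     "MeetingManager/Views/MenuBar/MenuBarView.swift",
--     "MeetingManager/Views/Notes/ExportOptionsView.swift",
--     "MeetingManager/Views/Notes/MarkdownRendererView.swift",
--     "MeetingManager/Views/Notes/MeetingNotesView.swift",
--     "MeetingManager/Views/Recording/AudioLevelMeterView.swift",
--     "MeetingManager/Views/Recording/AudioSourceToggleView.swift",
--     "MeetingManager/Views/Recording/RecordButtonView.swift",
--     "MeetingManager/Views/Recording/RecordingTimerView.swift",
--     "MeetingManager/Views/Recording/RecordingView.swift",
--     "MeetingManager/Views/Settings/OllamaSettingsView.swift",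
--     "MeetingManager/Views/Settings/SettingsView.swift",
--     "MeetingManager/Views/Settings/StorageSettingsView.swift",
--     "MeetingManager/Views/Settings/WhisperSettingsView.swift",
--     "MeetingManager/Views/Sidebar/MeetingRowView.swift",
--     "MeetingManager/Views/Sidebar/MeetingsSidebarView.swift",
--     "MeetingManager/Views/Transcript/TranscriptSegmentView.swift",
--     "MeetingManager/Views/Transcript/TranscriptView.swift",
-- ]
--
-- def files_in_group(group_path):
--     """Get files that belong to a specific group."""
--     result = []
--     for f in SWIFT_FILES:
--         rel = f.replace("MeetingManager/", "", 1)
--         parts = rel.split("/")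
--         if group_path == "" and len(parts) == 1:
--             result.append(f)
--         elif group_path and rel.startswith(group_path + "/"):
--             remaining = rel[len(group_path) + 1:]
--             if "/" not in remaining:
--                 result.append(f)
--     return result
-- ===== SOURCE B (Python) =====
-- SWIFT_FILES = [
--     "MeetingManager/MeetingManagerApp.swift",
--     "MeetingManager/Extensions/AVAudioPCMBuffer+Extensions.swift",
--     "MeetingManager/Extensions/CMSampleBuffer+Extensions.swift",
--     "MeetingManager/Extensions/Data+WAVHeader.swift",
--     "MeetingManager/Models/AudioSource.swift",
--     "MeetingManager/Models/Meeting.swift",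
--     "MeetingManager/Models/MeetingNotes.swift",
--     "MeetingManager/Models/OllamaTypes.swift",
--     "MeetingManager/Models/RecordingState.swift",
--     "MeetingManager/Models/Transcript.swift",
--     "MeetingManager/Services/AudioMixerService.swift",
--     "MeetingManager/Services/AudioRecordingService.swift",
--     "MeetingManager/Services/MicrophoneCaptureService.swift",
--     "MeetingManager/Services/OllamaService.swift",
--     "MeetingManager/Services/StorageService.swift",
--     "MeetingManager/Services/SystemAudioCaptureService.swift",
--     "MeetingManager/Services/TranscriptionService.swift",
--     "MeetingManager/Utilities/AudioFormatConverter.swift",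
--     "MeetingManager/Utilities/Constants.swift",
--     "MeetingManager/Utilities/DateFormatters.swift",
--     "MeetingManager/Utilities/WAVFileWriter.swift",
--     "MeetingManager/ViewModels/MeetingNotesViewModel.swift",
--     "MeetingManager/ViewModels/MeetingsListViewModel.swift",
--     "MeetingManager/ViewModels/RecordingViewModel.swift",
--     "MeetingManager/ViewModels/SettingsViewModel.swift",
--     "MeetingManager/ViewModels/TranscriptionViewModel.swift",
--     "MeetingManager/Views/Components/EmptyStateView.swift",
--     "MeetingManager/Views/Components/StatusIndicatorView.swift",
--     "MeetingManager/Views/Components/TagEditorView.swift",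
--     "MeetingManager/Views/Components/WaveformView.swift",
--     "MeetingManager/Views/ContentView.swift",
--     "MeetingManager/Views/MeetingDetailView.swift",
--     "MeetingManager/Views/MenuBar/MenuBarView.swift",
--     "MeetingManager/Views/Notes/ExportOptionsView.swift",
--     "MeetingManager/Views/Notes/MarkdownRendererView.swift",
--     "MeetingManager/Views/Notes/MeetingNotesView.swift",
--     "MeetingManager/Views/Recording/AudioLevelMeterView.swift",
--     "MeetingManager/Views/Recording/AudioSourceToggleView.swift",
--     "MeetingManager/Views/Recording/RecordButtonView.swift",
--     "MeetingManager/Views/Recording/RecordingTimerView.swift",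
--     "MeetingManager/Views/Recording/RecordingView.swift",
--     "MeetingManager/Views/Settings/OllamaSettingsView.swift",
--     "MeetingManager/Views/Settings/SettingsView.swift",
--     "MeetingManager/Views/Settings/StorageSettingsView.swift",
--     "MeetingManager/Views/Settings/WhisperSettingsView.swift",
--     "MeetingManager/Views/Sidebar/MeetingRowView.swift",
--     "MeetingManager/Views/Sidebar/MeetingsSidebarView.swift",
--     "MeetingManager/Views/Transcript/TranscriptSegmentView.swift",
--     "MeetingManager/Views/Transcript/TranscriptView.swift",
-- ]
--
-- # Build a parent-directory index once: every file is grouped under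
-- # '/'.join(parts[:-1]) of its path relative to "MeetingManager/".
-- _INDEX = {}
-- for _f in SWIFT_FILES:
--     _parts = _f[len("MeetingManager/"):].split("/")
--     _INDEX.setdefault("/".join(_parts[:-1]), []).append(_f)
--
--
-- def files_in_group(group_path):
--     """Get files that belong to a specific group."""
--     return _INDEX.get(group_path, [])
-- ===== Notes on version B (the rewrite author's own statement) =====
-- stated objective: alternative
-- what changed: B pre-groups all SWIFT_FILES once into a dict mapping each file's parent directory ('/'-joined path components minus the last, relative to 'MeetingManager/') to its files, so each call is a single dict lookup instead of A's per-call scan with prefix/substring tests.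
import Mathlib
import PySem

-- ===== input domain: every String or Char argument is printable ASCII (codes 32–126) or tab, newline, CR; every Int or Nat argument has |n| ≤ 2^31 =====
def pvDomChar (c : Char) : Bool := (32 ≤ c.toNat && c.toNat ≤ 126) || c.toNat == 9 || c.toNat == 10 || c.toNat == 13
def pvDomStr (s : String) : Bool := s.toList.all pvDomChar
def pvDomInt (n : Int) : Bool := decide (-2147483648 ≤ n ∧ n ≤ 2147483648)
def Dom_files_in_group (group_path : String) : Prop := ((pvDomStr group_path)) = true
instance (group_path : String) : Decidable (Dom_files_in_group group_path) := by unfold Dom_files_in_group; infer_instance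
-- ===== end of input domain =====

set_option maxRecDepth 8000
set_option maxHeartbeats 1000000


-- B builds a parent-directory → files index once and answers each query by a single
-- dictionary lookup instead of A's per-call branchy scan over SWIFT_FILES (objective: alternative).

def SWIFT_FILES : List String := [
    "MeetingManager/MeetingManagerApp.swift",
    "MeetingManager/Extensions/AVAudioPCMBuffer+Extensions.swift",
    "MeetingManager/Extensions/CMSampleBuffer+Extensions.swift",
    "MeetingManager/Extensions/Data+WAVHeader.swift",
    "MeetingManager/Models/AudioSource.swift",
    "MeetingManager/Models/Meeting.swift",
    "MeetingManager/Models/MeetingNotes.swift",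
    "MeetingManager/Models/OllamaTypes.swift",
    "MeetingManager/Models/RecordingState.swift",
    "MeetingManager/Models/Transcript.swift",
    "MeetingManager/Services/AudioMixerService.swift",
    "MeetingManager/Services/AudioRecordingService.swift",
    "MeetingManager/Services/MicrophoneCaptureService.swift",
    "MeetingManager/Services/OllamaService.swift",
    "MeetingManager/Services/StorageService.swift",
    "MeetingManager/Services/SystemAudioCaptureService.swift",
    "MeetingManager/Services/TranscriptionService.swift",
    "MeetingManager/Utilities/AudioFormatConverter.swift",
    "MeetingManager/Utilities/Constants.swift",
    "MeetingManager/Utilities/DateFormatters.swift",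
    "MeetingManager/Utilities/WAVFileWriter.swift",
    "MeetingManager/ViewModels/MeetingNotesViewModel.swift",
    "MeetingManager/ViewModels/MeetingsListViewModel.swift",
    "MeetingManager/ViewModels/RecordingViewModel.swift",
    "MeetingManager/ViewModels/SettingsViewModel.swift",
    "MeetingManager/ViewModels/TranscriptionViewModel.swift",
    "MeetingManager/Views/Components/EmptyStateView.swift",
    "MeetingManager/Views/Components/StatusIndicatorView.swift",
    "MeetingManager/Views/Components/TagEditorView.swift",
    "MeetingManager/Views/Components/WaveformView.swift",
    "MeetingManager/Views/ContentView.swift",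
    "MeetingManager/Views/MeetingDetailView.swift",
    "MeetingManager/Views/MenuBar/MenuBarView.swift",
    "MeetingManager/Views/Notes/ExportOptionsView.swift",
    "MeetingManager/Views/Notes/MarkdownRendererView.swift",
    "MeetingManager/Views/Notes/MeetingNotesView.swift",
    "MeetingManager/Views/Recording/AudioLevelMeterView.swift",
    "MeetingManager/Views/Recording/AudioSourceToggleView.swift",
    "MeetingManager/Views/Recording/RecordButtonView.swift",
    "MeetingManager/Views/Recording/RecordingTimerView.swift",
    "MeetingManager/Views/Recording/RecordingView.swift",
    "MeetingManager/Views/Settings/OllamaSettingsView.swift",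
    "MeetingManager/Views/Settings/SettingsView.swift",
    "MeetingManager/Views/Settings/StorageSettingsView.swift",
    "MeetingManager/Views/Settings/WhisperSettingsView.swift",
    "MeetingManager/Views/Sidebar/MeetingRowView.swift",
    "MeetingManager/Views/Sidebar/MeetingsSidebarView.swift",
    "MeetingManager/Views/Transcript/TranscriptSegmentView.swift",
    "MeetingManager/Views/Transcript/TranscriptView.swift",
]

-- ===== PORT A =====
-- s.replace(old, new, 1) for old ≠ "": replace the first occurrence only
-- (hand port, exact for nonempty old: PySem.Str.replace has no count parameter)
def replaceOnce (s old new : List Char) : List Char :=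
  let i := PySem.Chars.find s old
  if i = -1 then s else s.take i.toNat ++ new ++ s.drop (i.toNat + old.length)

def stepA (group_path : String) (result : List String) (f : String) : List String :=
  let rel := String.ofList (replaceOnce f.toList "MeetingManager/".toList [])
  -- rel.split("/"): sep "/" ≠ "" so PySem.Str.split? is always `some`
  let parts := (PySem.Str.split? rel "/").getD []
  if group_path = "" ∧ parts.length = 1 then result ++ [f]
  else if group_path ≠ "" ∧ PySem.Str.startswith rel (group_path ++ "/") = true then
    let remaining := PySem.Str.slice rel (some (PySem.Str.len group_path + 1)) none
    if PySem.Str.isIn "/" remaining = false then result ++ [f] else result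
  else result

def files_in_group (group_path : String) : List String :=
  SWIFT_FILES.foldl (stepA group_path) []

-- ===== PORT B =====
def parentDir (f : String) : String :=
  let rel := PySem.Str.slice f (some 15) none  -- f[len("MeetingManager/"):]
  let parts := (PySem.Str.split? rel "/").getD []
  PySem.Str.join "/" (PySem.List.slice parts none (some (-1)))

def fileIndex : PySem.Dict String (List String) :=
  SWIFT_FILES.foldl (fun d f => d.modify (parentDir f) [] (fun v => v ++ [f])) PySem.Dict.empty

def files_in_group_alt (group_path : String) : List String :=
  fileIndex.getD group_path []

-- ===== PRECONDITION & SPEC =====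
def Spec_files_in_group (group_path : String) (out : List String) : Prop := out = files_in_group_alt group_path
instance (group_path : String) (out : List String) : Decidable (Spec_files_in_group group_path out) := by unfold Spec_files_in_group; infer_instance

-- ===== CLAIM (what is proved, stated in full; the proofs are below) =====
def Claim_equal_files_in_group : Prop := ∀ (group_path : String), Dom_files_in_group group_path → Spec_files_in_group group_path (files_in_group group_path)

-- ===== LEMMAS AND PROOFS =====

-- A's per-file append condition, as a Bool predicate
def condA (group_path f : String) : Bool :=
  if group_path = "" ∧ ((PySem.Str.split? (String.ofList (replaceOnce f.toList "MeetingManager/".toList [])) "/").getD []).length = 1 then true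
  else if group_path ≠ "" ∧ PySem.Str.startswith (String.ofList (replaceOnce f.toList "MeetingManager/".toList [])) (group_path ++ "/") = true then
    if PySem.Str.isIn "/" (PySem.Str.slice (String.ofList (replaceOnce f.toList "MeetingManager/".toList [])) (some (PySem.Str.len group_path + 1)) none) = false then true else false
  else false

theorem stepA_eq (g : String) (r : List String) (f : String) :
    stepA g r f = if condA g f then r ++ [f] else r := by
  simp only [stepA, condA]
  split_ifs <;> first | rfl | simp_all

theorem foldl_stepA (g : String) (l : List String) (init : List String) :
    l.foldl (stepA g) init = init ++ l.filter (condA g) := by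
  induction l generalizing init with
  | nil => simp
  | cons a t ih =>
    simp only [List.foldl_cons, List.filter_cons, stepA_eq]
    by_cases h : condA g a
    · simp [h, ih, List.append_assoc]
    · simp [h, ih]

theorem build_getD (g : String) (l : List String) (d : PySem.Dict String (List String)) :
    (l.foldl (fun d f => d.modify (parentDir f) [] (fun v => v ++ [f])) d).getD g []
      = d.getD g [] ++ l.filter (fun f => parentDir f == g) := by
  induction l generalizing d with
  | nil => simp
  | cons a t ih =>
    have hstep : (d.modify (parentDir a) [] (fun v => v ++ [a])).getD g []
        = d.getD g [] ++ (if parentDir a == g then [a] else []) := by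
      have h := PySem.Dict.getD_foldl_modify_append [(parentDir a, a)] d g
      simp only [List.foldl_cons, List.foldl_nil, List.filter_cons, List.filter_nil] at h
      by_cases hc : parentDir a == g
      · simpa [hc] using h
      · simpa [hc] using h
    simp only [List.foldl_cons, List.filter_cons, ih, hstep]
    by_cases hc : parentDir a == g
    · simp [hc]
    · simp [hc]

theorem alt_eq (g : String) :
    files_in_group_alt g = SWIFT_FILES.filter (fun f => parentDir f == g) := by
  unfold files_in_group_alt fileIndex
  rw [build_getD]
  simp [PySem.Dict.getD, PySem.Dict.get?, PySem.Dict.empty]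

-- uniqueness of the last-slash decomposition
theorem lastSlash_unique : ∀ (p g s t : List Char), '/' ∉ s → '/' ∉ t →
    p ++ '/' :: s = g ++ '/' :: t → p = g := by
  intro p
  induction p with
  | nil =>
    intro g s t hs _ h
    cases g with
    | nil => rfl
    | cons b g' =>
      exfalso
      simp only [List.nil_append, List.cons_append, List.cons.injEq] at h
      exact hs (by rw [h.2]; simp)
  | cons a p' ih =>
    intro g s t hs ht h
    cases g with
    | nil =>
      exfalso
      simp only [List.nil_append, List.cons_append, List.cons.injEq] at h
      exact ht (by rw [← h.2]; simp)
    | cons b g' =>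
      simp only [List.cons_append, List.cons.injEq] at h
      rw [h.1, ih g' s t hs ht h.2]

-- A's two string tests characterise "g is the parent directory"
theorem cond_char (p s g : List Char) (hs : '/' ∉ s) :
    (PySem.Chars.startswith (p ++ '/' :: s) (g ++ ['/']) = true ∧
     PySem.Chars.isIn ['/'] ((p ++ '/' :: s).drop (g.length + 1)) = false) ↔ g = p := by
  constructor
  · rintro ⟨h1, h2⟩
    rw [PySem.Chars.startswith_iff] at h1
    obtain ⟨t, ht⟩ := h1
    have hlen : g.length + 1 = (g ++ ['/']).length := by simp
    have hdrop : (p ++ '/' :: s).drop (g.length + 1) = t := by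
      rw [← ht, hlen, List.drop_left]
    rw [PySem.Chars.isIn_eq_false_iff, hdrop] at h2
    have ht' : '/' ∉ t := fun hm => h2 (by
      obtain ⟨u, v, huv⟩ := List.append_of_mem hm
      exact ⟨u, v, by simp [huv]⟩)
    have heq : g ++ '/' :: t = p ++ '/' :: s := by simpa using ht
    exact lastSlash_unique g p t s ht' hs heq
  · rintro rfl
    refine ⟨?_, ?_⟩
    · rw [PySem.Chars.startswith_iff]
      exact ⟨s, by simp⟩
    · rw [PySem.Chars.isIn_eq_false_iff]
      have hdrop : (g ++ '/' :: s).drop (g.length + 1) = s := by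
        have hlen : g.length + 1 = (g ++ ['/']).length := by simp
        rw [show g ++ '/' :: s = (g ++ ['/']) ++ s by simp, hlen, List.drop_left]
      rw [hdrop]
      intro hinf
      exact hs (hinf.subset (by simp))

-- Str-level tests rewritten to the Chars level
theorem str_tests (L : List Char) (g : String) :
    (PySem.Str.startswith (String.ofList L) (g ++ "/") = PySem.Chars.startswith L (g.toList ++ ['/'])) ∧
    (PySem.Str.isIn "/" (PySem.Str.slice (String.ofList L) (some (PySem.Str.len g + 1)) none)
      = PySem.Chars.isIn ['/'] (L.drop (g.toList.length + 1))) := by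
  constructor
  · rw [PySem.Str.startswith_eq]; simp
  · rw [PySem.Str.isIn_eq, PySem.Str.toList_slice]
    have h1 : (PySem.Str.len g + 1) = ((g.toList.length + 1 : Nat) : Int) := by
      simp [PySem.Str.len_eq]
    rw [h1, PySem.Chars.slice_eq_listSlice, PySem.List.slice_from_natCast]
    simp

theorem per_file_multi (g f : String) (p s : List Char)
    (hrel : replaceOnce f.toList "MeetingManager/".toList [] = p ++ '/' :: s)
    (hs : '/' ∉ s)
    (hp : p ≠ [])
    (hlen : ¬ ((PySem.Str.split? (String.ofList (p ++ '/' :: s)) "/").getD []).length = 1)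
    (hparent : (parentDir f).toList = p) :
    condA g f = (parentDir f == g) := by
  obtain ⟨hSW, hIN⟩ := str_tests (p ++ '/' :: s) g
  unfold condA
  rw [hrel, Bool.eq_iff_iff, beq_iff_eq]
  rw [if_neg (fun hc => hlen hc.2)]
  have hiff := cond_char p s g.toList hs
  by_cases hg : g = ""
  · subst hg
    rw [if_neg (fun hc => hc.1 rfl)]
    simp only [Bool.false_eq_true, false_iff]
    intro h
    exact hp (by rw [← hparent, h]; rfl)
  · by_cases hsw : PySem.Chars.startswith (p ++ '/' :: s) (g.toList ++ ['/']) = true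
    · rw [if_pos ⟨hg, by rw [hSW]; exact hsw⟩, hIN]
      by_cases hin : PySem.Chars.isIn ['/'] (List.drop (g.toList.length + 1) (p ++ '/' :: s)) = false
      · rw [if_pos hin]
        constructor
        · intro _
          exact String.toList_inj.mp (by rw [hparent, hiff.mp ⟨hsw, hin⟩])
        · intro _; rfl
      · rw [if_neg hin]
        simp only [Bool.false_eq_true, false_iff]
        intro h
        exact hin (hiff.mpr (h ▸ hparent)).2
    · rw [if_neg (fun hc => hsw (by rw [← hSW]; exact hc.2))]
      simp only [Bool.false_eq_true, false_iff]
      intro h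
      exact hsw (hiff.mpr (h ▸ hparent)).1

theorem per_file_root (g f : String)
    (hns : '/' ∉ replaceOnce f.toList "MeetingManager/".toList [])
    (hlen : ((PySem.Str.split? (String.ofList (replaceOnce f.toList "MeetingManager/".toList [])) "/").getD []).length = 1)
    (hparent : parentDir f = "") :
    condA g f = (parentDir f == g) := by
  unfold condA
  rw [Bool.eq_iff_iff, beq_iff_eq, hparent]
  by_cases hg : g = ""
  · subst hg
    rw [if_pos ⟨rfl, hlen⟩]
    simp
  · rw [if_neg (fun hc => hg hc.1)]
    have hsw : ¬ PySem.Str.startswith (String.ofList (replaceOnce f.toList "MeetingManager/".toList [])) (g ++ "/") = true := by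
      rw [(str_tests (replaceOnce f.toList "MeetingManager/".toList []) g).1]
      rw [PySem.Chars.startswith_iff]
      intro hpre
      exact hns (hpre.subset (by simp))
    rw [if_neg (fun hc => hsw hc.2)]
    simp only [Bool.false_eq_true, false_iff]
    exact fun h => hg h.symm

-- ===== VERDICT (by name: the statement is the Claim_ definition above) =====
theorem files_in_group_spec : Claim_equal_files_in_group := by
  intro g _
  show files_in_group g = files_in_group_alt g
  rw [show files_in_group g = SWIFT_FILES.foldl (stepA g) [] from rfl, foldl_stepA, alt_eq,
      List.nil_append]
  apply List.filter_congr
  intro f hf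
  simp only [SWIFT_FILES, List.mem_cons, List.not_mem_nil, or_false] at hf
  rcases hf with rfl|rfl|rfl|rfl|rfl|rfl|rfl|rfl|rfl|rfl|rfl|rfl|rfl|rfl|rfl|rfl|rfl|rfl|rfl|rfl|rfl|rfl|rfl|rfl|rfl|rfl|rfl|rfl|rfl|rfl|rfl|rfl|rfl|rfl|rfl|rfl|rfl|rfl|rfl|rfl|rfl|rfl|rfl|rfl|rfl|rfl|rfl|rfl|rfl
  · exact per_file_root g _ (by decide) (by decide) (by decide)
  · exact per_file_multi g _ ("Extensions".toList) ("AVAudioPCMBuffer+Extensions.swift".toList) (by decide) (by decide) (by decide) (by decide) (by decide)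
  · exact per_file_multi g _ ("Extensions".toList) ("CMSampleBuffer+Extensions.swift".toList) (by decide) (by decide) (by decide) (by decide) (by decide)
  · exact per_file_multi g _ ("Extensions".toList) ("Data+WAVHeader.swift".toList) (by decide) (by decide) (by decide) (by decide) (by decide)
  · exact per_file_multi g _ ("Models".toList) ("AudioSource.swift".toList) (by decide) (by decide) (by decide) (by decide) (by decide)
  · exact per_file_multi g _ ("Models".toList) ("Meeting.swift".toList) (by decide) (by decide) (by decide) (by decide) (by decide)
  · exact per_file_multi g _ ("Models".toList) ("MeetingNotes.swift".toList) (by decide) (by decide) (by decide) (by decide) (by decide)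
  · exact per_file_multi g _ ("Models".toList) ("OllamaTypes.swift".toList) (by decide) (by decide) (by decide) (by decide) (by decide)
  · exact per_file_multi g _ ("Models".toList) ("RecordingState.swift".toList) (by decide) (by decide) (by decide) (by decide) (by decide)
  · exact per_file_multi g _ ("Models".toList) ("Transcript.swift".toList) (by decide) (by decide) (by decide) (by decide) (by decide)
  · exact per_file_multi g _ ("Services".toList) ("AudioMixerService.swift".toList) (by decide) (by decide) (by decide) (by decide) (by decide)
  · exact per_file_multi g _ ("Services".toList) ("AudioRecordingService.swift".toList) (by decide) (by decide) (by decide) (by decide) (by decide)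
  · exact per_file_multi g _ ("Services".toList) ("MicrophoneCaptureService.swift".toList) (by decide) (by decide) (by decide) (by decide) (by decide)
  · exact per_file_multi g _ ("Services".toList) ("OllamaService.swift".toList) (by decide) (by decide) (by decide) (by decide) (by decide)
  · exact per_file_multi g _ ("Services".toList) ("StorageService.swift".toList) (by decide) (by decide) (by decide) (by decide) (by decide)
  · exact per_file_multi g _ ("Services".toList) ("SystemAudioCaptureService.swift".toList) (by decide) (by decide) (by decide) (by decide) (by decide)
  · exact per_file_multi g _ ("Services".toList) ("TranscriptionService.swift".toList) (by decide) (by decide) (by decide) (by decide) (by decide)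
  · exact per_file_multi g _ ("Utilities".toList) ("AudioFormatConverter.swift".toList) (by decide) (by decide) (by decide) (by decide) (by decide)
  · exact per_file_multi g _ ("Utilities".toList) ("Constants.swift".toList) (by decide) (by decide) (by decide) (by decide) (by decide)
  · exact per_file_multi g _ ("Utilities".toList) ("DateFormatters.swift".toList) (by decide) (by decide) (by decide) (by decide) (by decide)
  · exact per_file_multi g _ ("Utilities".toList) ("WAVFileWriter.swift".toList) (by decide) (by decide) (by decide) (by decide) (by decide)
  · exact per_file_multi g _ ("ViewModels".toList) ("MeetingNotesViewModel.swift".toList) (by decide) (by decide) (by decide) (by decide) (by decide)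
  · exact per_file_multi g _ ("ViewModels".toList) ("MeetingsListViewModel.swift".toList) (by decide) (by decide) (by decide) (by decide) (by decide)
  · exact per_file_multi g _ ("ViewModels".toList) ("RecordingViewModel.swift".toList) (by decide) (by decide) (by decide) (by decide) (by decide)
  · exact per_file_multi g _ ("ViewModels".toList) ("SettingsViewModel.swift".toList) (by decide) (by decide) (by decide) (by decide) (by decide)
  · exact per_file_multi g _ ("ViewModels".toList) ("TranscriptionViewModel.swift".toList) (by decide) (by decide) (by decide) (by decide) (by decide)
  · exact per_file_multi g _ ("Views/Components".toList) ("EmptyStateView.swift".toList) (by decide) (by decide) (by decide) (by decide) (by decide)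
  · exact per_file_multi g _ ("Views/Components".toList) ("StatusIndicatorView.swift".toList) (by decide) (by decide) (by decide) (by decide) (by decide)
  · exact per_file_multi g _ ("Views/Components".toList) ("TagEditorView.swift".toList) (by decide) (by decide) (by decide) (by decide) (by decide)
  · exact per_file_multi g _ ("Views/Components".toList) ("WaveformView.swift".toList) (by decide) (by decide) (by decide) (by decide) (by decide)
  · exact per_file_multi g _ ("Views".toList) ("ContentView.swift".toList) (by decide) (by decide) (by decide) (by decide) (by decide)
  · exact per_file_multi g _ ("Views".toList) ("MeetingDetailView.swift".toList) (by decide) (by decide) (by decide) (by decide) (by decide)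
  · exact per_file_multi g _ ("Views/MenuBar".toList) ("MenuBarView.swift".toList) (by decide) (by decide) (by decide) (by decide) (by decide)
  · exact per_file_multi g _ ("Views/Notes".toList) ("ExportOptionsView.swift".toList) (by decide) (by decide) (by decide) (by decide) (by decide)
  · exact per_file_multi g _ ("Views/Notes".toList) ("MarkdownRendererView.swift".toList) (by decide) (by decide) (by decide) (by decide) (by decide)
  · exact per_file_multi g _ ("Views/Notes".toList) ("MeetingNotesView.swift".toList) (by decide) (by decide) (by decide) (by decide) (by decide)
  · exact per_file_multi g _ ("Views/Recording".toList) ("AudioLevelMeterView.swift".toList) (by decide) (by decide) (by decide) (by decide) (by decide)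
  · exact per_file_multi g _ ("Views/Recording".toList) ("AudioSourceToggleView.swift".toList) (by decide) (by decide) (by decide) (by decide) (by decide)
  · exact per_file_multi g _ ("Views/Recording".toList) ("RecordButtonView.swift".toList) (by decide) (by decide) (by decide) (by decide) (by decide)
  · exact per_file_multi g _ ("Views/Recording".toList) ("RecordingTimerView.swift".toList) (by decide) (by decide) (by decide) (by decide) (by decide)
  · exact per_file_multi g _ ("Views/Recording".toList) ("RecordingView.swift".toList) (by decide) (by decide) (by decide) (by decide) (by decide)
  · exact per_file_multi g _ ("Views/Settings".toList) ("OllamaSettingsView.swift".toList) (by decide) (by decide) (by decide) (by decide) (by decide)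
  · exact per_file_multi g _ ("Views/Settings".toList) ("SettingsView.swift".toList) (by decide) (by decide) (by decide) (by decide) (by decide)
  · exact per_file_multi g _ ("Views/Settings".toList) ("StorageSettingsView.swift".toList) (by decide) (by decide) (by decide) (by decide) (by decide)
  · exact per_file_multi g _ ("Views/Settings".toList) ("WhisperSettingsView.swift".toList) (by decide) (by decide) (by decide) (by decide) (by decide)
  · exact per_file_multi g _ ("Views/Sidebar".toList) ("MeetingRowView.swift".toList) (by decide) (by decide) (by decide) (by decide) (by decide)
  · exact per_file_multi g _ ("Views/Sidebar".toList) ("MeetingsSidebarView.swift".toList) (by decide) (by decide) (by decide) (by decide) (by decide)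
  · exact per_file_multi g _ ("Views/Transcript".toList) ("TranscriptSegmentView.swift".toList) (by decide) (by decide) (by decide) (by decide) (by decide)
  · exact per_file_multi g _ ("Views/Transcript".toList) ("TranscriptView.swift".toList) (by decide) (by decide) (by decide) (by decide) (by decide)
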